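-- pv_equiv track=rewrite | github.com/won-N-only/algorithm_python | 백준/Silver/1946. 신입 사원/신입 사원.py | interview
-- ===== SOURCE A (Python) =====
-- def interview(applicants):
--     applicants.sort()
--     idx = 1
--     best = applicants[0][1]
--
--     for _, score in applicants[1:]:
--         if score < best:
--             idx += 1
--             best = score
--
--     return idx
-- ===== SOURCE B (Python) =====
-- def interview(applicants):
--     applicants.sort()
--     cur = None
--     mins = []
--     for _, score in applicants:
--         cur = score if cur is None or score < cur else cur
--         mins.append(cur)
--     return len(set(mins))
-- ===== Notes on version B (the rewrite author's own statement) =====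
-- stated objective: idiomatic
-- what changed: Instead of a record-counting loop with an index counter seeded from applicants[0], B builds the running prefix-minimum sequence of the scores and returns the number of distinct values in it (each strict new minimum contributes exactly one new distinct prefix-min).
-- outside the precondition, e.g. on interview([]): A raises IndexError, B returns 0
-- crash fix: On the empty list A raises IndexError (it reads applicants[0]); B naturally returns 0. — e.g. on interview([]): A raises IndexError, B returns 0
import Mathlib
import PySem

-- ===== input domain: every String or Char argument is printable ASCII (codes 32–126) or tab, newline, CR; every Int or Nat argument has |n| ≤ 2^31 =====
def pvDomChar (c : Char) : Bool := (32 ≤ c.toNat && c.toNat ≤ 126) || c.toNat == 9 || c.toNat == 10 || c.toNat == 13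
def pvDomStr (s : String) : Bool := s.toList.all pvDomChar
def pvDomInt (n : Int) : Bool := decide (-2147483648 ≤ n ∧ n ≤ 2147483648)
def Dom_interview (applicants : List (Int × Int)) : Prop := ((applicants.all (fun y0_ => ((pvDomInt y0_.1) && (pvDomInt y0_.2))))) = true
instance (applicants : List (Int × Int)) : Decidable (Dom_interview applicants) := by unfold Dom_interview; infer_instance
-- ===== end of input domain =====

-- B replaces A's record-counting loop by counting distinct running prefix minima of the scores (same O(n log n) cost, more declarative); on the empty list A raises IndexError while B returns 0 (excluded by Pre_). Both Pythons sort `applicants` in place; the equivalence proved is about the return value.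


-- ===== PORT A =====
-- applicants.sort(); idx = 1; best = applicants[0][1]; for _, score in applicants[1:]: if score < best: idx += 1; best = score
def interview (applicants : List (Int × Int)) : Int :=
  match PySem.List.pyGet? (PySem.List.sorted2 applicants (fun p => p.1) (fun p => p.2)) 0 with
  | none => 0  -- IndexError on the empty list (excluded by Pre_)
  | some a =>
    ((PySem.List.slice (PySem.List.sorted2 applicants (fun p => p.1) (fun p => p.2)) (some 1) none).foldl
      (fun (st : Int × Int) p => if p.2 < st.2 then (st.1 + 1, p.2) else st) (1, a.2)).1

-- ===== PORT B =====
-- applicants.sort(); cur = None; mins = []; for _, score: cur = score if cur is None or score < cur else cur; mins.append(cur); return len(set(mins))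
def interview_alt (applicants : List (Int × Int)) : Int :=
  ((PySem.Set.ofList
    (((PySem.List.sorted2 applicants (fun p => p.1) (fun p => p.2)).foldl
      (fun (st : Option Int × List Int) p =>
        let cur : Int := match st.1 with
          | none => p.2
          | some c => if p.2 < c then p.2 else c
        (some cur, st.2 ++ [cur])) (none, [])).2)).length : Int)

-- ===== PRECONDITION & SPEC =====
-- Pre_ excludes only the empty list, on which A raises IndexError reading applicants[0].
def Pre_interview (applicants : List (Int × Int)) : Prop := applicants ≠ []
instance (applicants : List (Int × Int)) : Decidable (Pre_interview applicants) := by unfold Pre_interview; infer_instance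
def pvWitness_interview : (List (Int × Int)) := [(2, 5), (1, 3)]

-- On the empty list A raises IndexError (it reads applicants[0]); B naturally returns 0.
def Raises_interview (applicants : List (Int × Int)) : Prop := applicants = []
instance (applicants : List (Int × Int)) : Decidable (Raises_interview applicants) := by unfold Raises_interview; infer_instance
def pvRaiseWitness_interview : (List (Int × Int)) := []
def pvRaiseWitnessOut_interview : Int := 0

def Spec_interview (applicants : List (Int × Int)) (out : Int) : Prop := out = interview_alt applicants
instance (applicants : List (Int × Int)) (out : Int) : Decidable (Spec_interview applicants out) := by unfold Spec_interview; infer_instance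

-- ===== CLAIM (what is proved, stated in full; the proofs are below) =====
def Claim_equal_interview : Prop := ∀ (applicants : List (Int × Int)), Dom_interview applicants → Pre_interview applicants → Spec_interview applicants (interview applicants)
def Claim_raises_interview : Prop := (∀ (applicants : List (Int × Int)), Dom_interview applicants → Raises_interview applicants → ¬ Pre_interview applicants) ∧ (Dom_interview (pvRaiseWitness_interview) ∧ Raises_interview (pvRaiseWitness_interview) ∧ interview_alt (pvRaiseWitness_interview) = pvRaiseWitnessOut_interview)

-- ===== LEMMAS AND PROOFS =====

-- B's loop body (cur already set) and A's loop body, as named functions for the invariant lemma.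
def stepB (st : Option Int × List Int) (p : Int × Int) : Option Int × List Int :=
  let cur : Int := match st.1 with
    | none => p.2
    | some c => if p.2 < c then p.2 else c
  (some cur, st.2 ++ [cur])

def stepA (st : Int × Int) (p : Int × Int) : Int × Int :=
  if p.2 < st.2 then (st.1 + 1, p.2) else st

theorem ofList_append_singleton {α : Type} [BEq α] (l : List α) (y : α) :
    PySem.Set.ofList (l ++ [y]) = PySem.Set.add (PySem.Set.ofList l) y := by
  simp [PySem.Set.ofList_eq_foldl, List.foldl_append]

-- Loop invariant: if best is the minimum of the prefix-min list pref and idx counts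
-- its distinct values, then after consuming rest both programs still agree.
theorem main_inv (rest : List (Int × Int)) :
    ∀ (best : Int) (pref : List Int) (idx : Int),
      best ∈ pref → (∀ x ∈ pref, best ≤ x) →
      ((PySem.Set.ofList pref).length : Int) = idx →
      ((PySem.Set.ofList ((rest.foldl stepB (some best, pref)).2)).length : Int)
        = (rest.foldl stepA (idx, best)).1 := by
  induction rest with
  | nil => intro best pref idx _ _ hlen; simpa using hlen
  | cons p rest ih =>
    intro best pref idx hmem hle hlen
    by_cases h : p.2 < best
    · have hnot : p.2 ∉ pref := fun hx => absurd (hle _ hx) (by omega)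
      have : ((PySem.Set.ofList (pref ++ [p.2])).length : Int) = idx + 1 := by
        rw [ofList_append_singleton]
        simp [PySem.Set.add, hnot, ← hlen]
      simp only [List.foldl_cons, stepB, stepA, h]
      exact ih p.2 (pref ++ [p.2]) (idx + 1) (by simp)
        (by intro x hx; rcases List.mem_append.1 hx with hx | hx
            · exact le_of_lt (lt_of_lt_of_le h (hle _ hx))
            · simp_all) this
    · have : PySem.Set.ofList (pref ++ [best]) = PySem.Set.ofList pref := by
        rw [ofList_append_singleton]
        simp [PySem.Set.add, hmem]
      simp only [List.foldl_cons, stepB, stepA, h]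
      exact ih best (pref ++ [best]) idx (by simp)
        (by intro x hx; rcases List.mem_append.1 hx with hx | hx
            · exact hle _ hx
            · simp_all) (by rw [this]; exact hlen)

-- ===== VERDICT (by name: the statement is the Claim_ definition above) =====
theorem interview_spec : Claim_equal_interview := by
  intro applicants _ hpre
  unfold Spec_interview interview interview_alt
  have hs : PySem.List.sorted2 applicants (fun p => p.1) (fun p => p.2) ≠ [] := by
    intro h
    apply hpre
    have := PySem.List.sorted2_perm applicants (fun p => p.1) (fun p => p.2) (rev := false)
    rw [h] at this
    exact (List.Perm.nil_eq this).symm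
  obtain ⟨a, rest, hcons⟩ := List.exists_cons_of_ne_nil hs
  rw [hcons]
  have hget : PySem.List.pyGet? (a :: rest) 0 = some a := by
    simp [PySem.List.pyGet?, PySem.List.pyIdx?]
  simp only [hget, PySem.List.slice_from_one, List.tail_cons, List.foldl_cons]
  have h0 : stepB (none, []) a = (some a.2, [a.2]) := by simp [stepB]
  have := main_inv rest a.2 [a.2] 1 (by simp) (by simp) (by simp [PySem.Set.ofList_eq_foldl, PySem.Set.add])
  show (rest.foldl stepA (1, a.2)).1
      = ((PySem.Set.ofList ((rest.foldl stepB (stepB (none, []) a)).2)).length : Int)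
  rw [h0, this]

theorem interview_raises : Claim_raises_interview := by
  unfold Claim_raises_interview
  exact ⟨fun _ _ h => by simp [Pre_interview, Raises_interview] at *; exact h, by decide⟩

-- self-check: the raise-witness value stated above really is B's output there
theorem interview_raises_witness :
    interview_alt pvRaiseWitness_interview = pvRaiseWitnessOut_interview := by
  have h := interview_raises
  unfold Claim_raises_interview at h
  exact h.2.2.2
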